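-- pv_equiv track=rewrite | github.com/armorale/WeightZoneMatrix_bySvc | Excel_GridConversion_Rating.py | createZoneHeader
-- ===== SOURCE A (Python) =====
-- def createZoneHeader(orderZones): #function to return a header of the unique zones in the data set
-- 	numericZones = []
-- 	numericZonesSorted = []
-- 	alphabeticZones = []
-- 	alphabeticZonesSorted =[]
-- 	for i in range(len(orderZones)):
-- 		try:
-- 			if int(orderZones[i])>0:
-- 				numericZones.append(orderZones[i])
-- 		except ValueError:
-- 			alphabeticZones.append(orderZones[i])
-- 	numericZonesSorted = sorted(numericZones)
-- 	alphabeticZonesSorted = sorted(alphabeticZones)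
-- 	combinedHeader = []
-- 	combinedHeader = numericZonesSorted + alphabeticZonesSorted
-- 	return combinedHeader
-- ===== SOURCE B (Python) =====
-- def createZoneHeader(orderZones):
--     def group(z):
--         try:
--             return 0 if int(z) > 0 else None
--         except ValueError:
--             return 1
--     ordered = sorted(orderZones)
--     return [z for z in ordered if group(z) == 0] + [z for z in ordered if group(z) == 1]
-- ===== Notes on version B (the rewrite author's own statement) =====
-- stated objective: simpler
-- what changed: Inverts A's pipeline: instead of classifying first into two bucket lists and then running two independent sorts, B sorts the whole input once up front and then takes two classification filter passes over that single sorted list (positive-numeric strings first, then ValueError strings); correct because filtering a sorted list yields the sorted filtered list.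
import Mathlib
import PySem

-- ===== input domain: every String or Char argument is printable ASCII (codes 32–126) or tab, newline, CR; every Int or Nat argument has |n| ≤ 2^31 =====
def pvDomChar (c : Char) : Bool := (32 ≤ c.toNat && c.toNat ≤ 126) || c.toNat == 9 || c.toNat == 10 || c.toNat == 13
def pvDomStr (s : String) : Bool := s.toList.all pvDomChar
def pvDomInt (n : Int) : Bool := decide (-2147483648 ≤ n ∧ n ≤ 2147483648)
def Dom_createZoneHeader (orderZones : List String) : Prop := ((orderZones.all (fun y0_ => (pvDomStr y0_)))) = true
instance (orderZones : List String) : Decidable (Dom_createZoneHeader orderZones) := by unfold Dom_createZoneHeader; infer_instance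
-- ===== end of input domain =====

-- B inverts A's pipeline: one sort of the whole input up front, then two classification
-- filter passes over that sorted list, instead of classify-first plus two bucket sorts (simpler).

-- ===== PORT A =====
-- A: index loop over range(len(orderZones)); int(z) succeeding with value > 0 appends to the
-- numeric bucket, ValueError (ofStr? = none) appends to the alphabetic bucket; then the two
-- buckets are sorted independently and concatenated.
def createZoneHeader (orderZones : List String) : List String :=
  let r := (PySem.List.pyRange 0 (PySem.List.len orderZones)).foldl
    (fun (s : List String × List String) i =>
      match PySem.Int.ofStr? (PySem.List.pyGetD orderZones i "") with
      | some k => if k > 0 then (s.1 ++ [PySem.List.pyGetD orderZones i ""], s.2) else s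
      | none => (s.1, s.2 ++ [PySem.List.pyGetD orderZones i ""])) ([], [])
  PySem.List.sorted r.1 (fun x => x) ++ PySem.List.sorted r.2 (fun x => x)

-- ===== PORT B =====
-- B's helper group(z): some 0 = positive numeric, some 1 = ValueError, none = dropped.
def pvGroup (z : String) : Option Int :=
  match PySem.Int.ofStr? z with
  | some k => if k > 0 then some 0 else none
  | none => some 1

-- B: sort the whole input once, then two filter passes over the sorted list.
def createZoneHeader_alt (orderZones : List String) : List String :=
  let ordered := PySem.List.sorted orderZones (fun x => x)
  ordered.filter (fun z => pvGroup z == some 0) ++ ordered.filter (fun z => pvGroup z == some 1)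

-- ===== PRECONDITION & SPEC =====
def Spec_createZoneHeader (orderZones : List String) (out : List String) : Prop := out = createZoneHeader_alt orderZones
instance (orderZones : List String) (out : List String) : Decidable (Spec_createZoneHeader orderZones out) := by unfold Spec_createZoneHeader; infer_instance

-- ===== CLAIM (what is proved, stated in full; the proofs are below) =====
def Claim_equal_createZoneHeader : Prop := ∀ (orderZones : List String), Dom_createZoneHeader orderZones → Spec_createZoneHeader orderZones (createZoneHeader orderZones)

-- ===== LEMMAS AND PROOFS =====

-- A's pair-accumulator loop builds exactly the two group-filters
theorem pvA_fold (l : List String) (n a : List String) :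
    l.foldl
      (fun (s : List String × List String) z =>
        match PySem.Int.ofStr? z with
        | some k => if k > 0 then (s.1 ++ [z], s.2) else s
        | none => (s.1, s.2 ++ [z])) (n, a)
    = (n ++ l.filter (fun z => pvGroup z == some 0),
       a ++ l.filter (fun z => pvGroup z == some 1)) := by
  induction l generalizing n a with
  | nil => simp
  | cons z t ih =>
    simp only [List.foldl_cons, List.filter_cons]
    cases h : PySem.Int.ofStr? z with
    | some k =>
      by_cases hk : k > 0 <;> simp [h, hk, pvGroup, ih]
    | none => simp [h, pvGroup, ih]

-- filtering a sorted list is the sort of the filtered list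
theorem pvFilter_sorted (l : List String) (p : String → Bool) :
    (PySem.List.sorted l (fun x => x)).filter p
    = PySem.List.sorted (l.filter p) (fun x => x) := by
  refine (PySem.List.sorted_id_eq_of_perm_of_pairwise
    (l.filter p) ((PySem.List.sorted l (fun x => x)).filter p) ?_ ?_).symm
  · exact (PySem.List.sorted_perm l (fun x => x) false).filter p
  · exact (PySem.List.sorted_pairwise l (fun x => x)).sublist (List.filter_sublist)

-- A rewritten: the buckets A sorts are the two filters
theorem pvA_eq (oz : List String) :
    createZoneHeader oz =
      PySem.List.sorted (oz.filter (fun z => pvGroup z == some 0)) (fun x => x) ++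
      PySem.List.sorted (oz.filter (fun z => pvGroup z == some 1)) (fun x => x) := by
  unfold createZoneHeader
  rw [PySem.List.foldl_pyRange_pyGetD oz ""
    (fun (s : List String × List String) z =>
      match PySem.Int.ofStr? z with
      | some k => if k > 0 then (s.1 ++ [z], s.2) else s
      | none => (s.1, s.2 ++ [z])) ([], []) (le_refl 0)]
  simp only [Int.toNat_zero, List.drop_zero]
  rw [pvA_fold oz [] []]
  simp

-- ===== VERDICT (by name: the statement is the Claim_ definition above) =====
theorem createZoneHeader_spec : Claim_equal_createZoneHeader := by
  intro oz _
  unfold Spec_createZoneHeader createZoneHeader_alt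
  simp only []
  rw [pvA_eq oz, pvFilter_sorted, pvFilter_sorted]
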